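-- pv_equiv track=rewrite | github.com/jyrj/crux | eval/analyze_results.py | match_violations
-- ===== SOURCE A (Python) =====
-- def match_violations(found: list[dict], expected: list[dict]) -> tuple[int, int, int]:
--     """Returns (TP, FP, FN). Matches on (rule, src, dst)."""
--     matched = set()
--     tp = 0
--     for f in found:
--         f_key = (f.get("rule"), f.get("source_domain"), f.get("dest_domain"))
--         for i, e in enumerate(expected):
--             if i in matched:
--                 continue
--             e_key = (e.get("rule"), e.get("src"), e.get("dst"))
--             if f_key == e_key:
--                 tp += 1; matched.add(i); break
--     return tp, len(found) - tp, len(expected) - len(matched)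
-- ===== SOURCE B (Python) =====
-- def match_violations(found: list[dict], expected: list[dict]) -> tuple[int, int, int]:
--     """Returns (TP, FP, FN). Matches on (rule, src, dst)."""
--     cnt = {}
--     for e in expected:
--         k = (e.get("rule"), e.get("src"), e.get("dst"))
--         cnt[k] = cnt.get(k, 0) + 1
--     tp = 0
--     for f in found:
--         k = (f.get("rule"), f.get("source_domain"), f.get("dest_domain"))
--         c = cnt.get(k, 0)
--         if c > 0:
--             cnt[k] = c - 1
--             tp += 1
--     return tp, len(found) - tp, len(expected) - tp
-- ===== Notes on version B (the rewrite author's own statement) =====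
-- stated objective: alternative
-- what changed: Replaces the nested scan of expected for each found item (with a matched-index set) by a multiset counter of expected keys built once and decremented per found key; FN is computed as len(expected)-tp since each match consumes one expected item.
import Mathlib
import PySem

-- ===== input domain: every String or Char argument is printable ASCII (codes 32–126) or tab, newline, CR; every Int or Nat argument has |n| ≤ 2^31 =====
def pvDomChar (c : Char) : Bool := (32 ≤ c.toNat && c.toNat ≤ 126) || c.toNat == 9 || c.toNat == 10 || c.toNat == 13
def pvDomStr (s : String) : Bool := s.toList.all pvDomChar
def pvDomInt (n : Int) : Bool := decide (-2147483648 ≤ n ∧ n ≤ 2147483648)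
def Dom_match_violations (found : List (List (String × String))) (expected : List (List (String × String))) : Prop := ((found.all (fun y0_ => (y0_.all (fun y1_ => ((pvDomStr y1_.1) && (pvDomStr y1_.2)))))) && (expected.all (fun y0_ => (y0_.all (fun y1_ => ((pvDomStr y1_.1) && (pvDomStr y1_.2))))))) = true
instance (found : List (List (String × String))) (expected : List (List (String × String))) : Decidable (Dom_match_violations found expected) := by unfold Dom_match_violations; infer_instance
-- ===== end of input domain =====

-- B replaces A's per-item scan of expected (with a matched-index set) by a counter of expected keys, decremented per found key; return values proved equal.

-- ===== PORT A =====
-- f_key = (f.get("rule"), f.get("source_domain"), f.get("dest_domain"))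
def pvKeyF (f : List (String × String)) : Option String × Option String × Option String :=
  ((PySem.Dict.mk f).get? "rule", (PySem.Dict.mk f).get? "source_domain", (PySem.Dict.mk f).get? "dest_domain")

-- e_key = (e.get("rule"), e.get("src"), e.get("dst"))
def pvKeyE (e : List (String × String)) : Option String × Option String × Option String :=
  ((PySem.Dict.mk e).get? "rule", (PySem.Dict.mk e).get? "src", (PySem.Dict.mk e).get? "dst")

-- the inner `for i, e in enumerate(expected): if i in matched: continue; … break`
def pvFindA (fkey : Option String × Option String × Option String)
    (matched : PySem.Set Nat) : List (List (String × String)) → Nat → Option Nat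
  | [], _ => none
  | e :: rest, i =>
    if matched.contains i then pvFindA fkey matched rest (i + 1)
    else if pvKeyE e = fkey then some i
    else pvFindA fkey matched rest (i + 1)

def match_violations (found : List (List (String × String))) (expected : List (List (String × String))) : Int × Int × Int :=
  let st := found.foldl (fun (st : PySem.Set Nat × Int) f =>
    match pvFindA (pvKeyF f) st.1 expected 0 with
    | some i => (PySem.Set.add st.1 i, st.2 + 1)
    | none => st) (PySem.Set.empty, 0)
  (st.2, (found.length : Int) - st.2, (expected.length : Int) - (st.1.length : Int))

-- ===== PORT B =====
def match_violations_alt (found : List (List (String × String))) (expected : List (List (String × String))) : Int × Int × Int :=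
  let cnt := expected.foldl (fun (d : PySem.Dict (Option String × Option String × Option String) Int) e =>
    d.insert (pvKeyE e) (d.getD (pvKeyE e) 0 + 1)) PySem.Dict.empty
  let st := found.foldl (fun (st : Int × PySem.Dict (Option String × Option String × Option String) Int) f =>
    let c := st.2.getD (pvKeyF f) 0
    if c > 0 then (st.1 + 1, st.2.insert (pvKeyF f) (c - 1)) else st) (0, cnt)
  (st.1, (found.length : Int) - st.1, (expected.length : Int) - st.1)

-- ===== PRECONDITION & SPEC =====
def Spec_match_violations (found : List (List (String × String))) (expected : List (List (String × String))) (out : Int × Int × Int) : Prop := out = match_violations_alt found expected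
instance (found : List (List (String × String))) (expected : List (List (String × String))) (out : Int × Int × Int) : Decidable (Spec_match_violations found expected out) := by unfold Spec_match_violations; infer_instance

-- ===== CLAIM (what is proved, stated in full; the proofs are below) =====
def Claim_equal_match_violations : Prop := ∀ (found : List (List (String × String))) (expected : List (List (String × String))), Dom_match_violations found expected → Spec_match_violations found expected (match_violations found expected)

-- ===== LEMMAS AND PROOFS =====

-- keys of expected, and the multiset of keys of still-unmatched expected entries
def pvKeys (expected : List (List (String × String))) : List (Option String × Option String × Option String) :=
  expected.map pvKeyE

def pvUnmatched (expected : List (List (String × String))) (matched : List Nat) :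
    List (Option String × Option String × Option String) :=
  (((List.range expected.length).filter (fun i => ! matched.contains i)).map
    (fun i => (pvKeys expected).getD i (none, none, none)))

-- the loop invariant
def pvInv (expected : List (List (String × String))) (matched : List Nat)
    (cnt : PySem.Dict (Option String × Option String × Option String) Int) (tpA tpB : Int) : Prop :=
  tpA = tpB ∧ tpA = (matched.length : Int) ∧ matched.Nodup ∧
  (∀ i ∈ matched, i < expected.length) ∧
  (∀ k, cnt.getD k 0 = ((pvUnmatched expected matched).count k : Int))

lemma pvFindA_none_iff (fkey) (matched : PySem.Set Nat) :
    ∀ (l : List (List (String × String))) (s : Nat),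
    (pvFindA fkey matched l s = none ↔
      ∀ j, (h : j < l.length) → ¬ matched.contains (s + j) = true → pvKeyE l[j] ≠ fkey) := by
  intro l
  induction l with
  | nil => intro s; simp [pvFindA]
  | cons e rest ih =>
    intro s
    rw [pvFindA]
    by_cases hc : matched.contains s = true
    · rw [if_pos hc, ih (s+1)]
      constructor
      · intro h j hj hnm
        cases j with
        | zero => exact absurd (by simpa using hc) hnm
        | succ j =>
          have := h j (by simpa using Nat.lt_of_succ_lt_succ hj) (by rw [show s + 1 + j = s + (j+1) by omega]; exact hnm)
          simpa using this
      · intro h j hj hnm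
        have := h (j+1) (by simpa using Nat.succ_lt_succ hj) (by rw [show s + (j+1) = s + 1 + j by omega]; exact hnm)
        simpa using this
    · rw [if_neg hc]
      by_cases hk : pvKeyE e = fkey
      · rw [if_pos hk]
        simp only [reduceCtorEq, false_iff, not_forall]
        exact ⟨0, by simp, by simpa using hc, not_not_intro (by simpa using hk)⟩
      · rw [if_neg hk, ih (s+1)]
        constructor
        · intro h j hj hnm
          cases j with
          | zero => simpa using hk
          | succ j =>
            have := h j (by simpa using Nat.lt_of_succ_lt_succ hj) (by rw [show s + 1 + j = s + (j+1) by omega]; exact hnm)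
            simpa using this
        · intro h j hj hnm
          have := h (j+1) (by simpa using Nat.succ_lt_succ hj) (by rw [show s + (j+1) = s + 1 + j by omega]; exact hnm)
          simpa using this

lemma pvFindA_some (fkey) (matched : PySem.Set Nat) :
    ∀ (l : List (List (String × String))) (s : Nat) (i : Nat),
    pvFindA fkey matched l s = some i →
    ¬ matched.contains i = true ∧ ∃ j, ∃ h : j < l.length, i = s + j ∧ pvKeyE l[j] = fkey := by
  intro l
  induction l with
  | nil => intro s i h; simp [pvFindA] at h
  | cons e rest ih =>
    intro s i h
    rw [pvFindA] at h
    by_cases hc : matched.contains s = true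
    · rw [if_pos hc] at h
      obtain ⟨h1, j, hj, hij, hkey⟩ := ih (s+1) i h
      exact ⟨h1, j+1, by simpa using Nat.succ_lt_succ hj, by omega, by simpa using hkey⟩
    · rw [if_neg hc] at h
      by_cases hk : pvKeyE e = fkey
      · rw [if_pos hk] at h
        cases h
        exact ⟨hc, 0, by simp, by omega, by simpa using hk⟩
      · rw [if_neg hk] at h
        obtain ⟨h1, j, hj, hij, hkey⟩ := ih (s+1) i h
        exact ⟨h1, j+1, by simpa using Nat.succ_lt_succ hj, by omega, by simpa using hkey⟩

-- count in unmatched is positive iff some unmatched index has that key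
lemma pvCount_pos_iff (expected) (matched : List Nat) (k) :
    0 < (pvUnmatched expected matched).count k ↔
      ∃ i, ∃ h : i < expected.length, ¬ matched.contains i = true ∧ pvKeyE expected[i] = k := by
  rw [List.count_pos_iff]
  simp only [pvUnmatched, List.mem_map, List.mem_filter, List.mem_range, Bool.not_eq_true']
  constructor
  · rintro ⟨i, ⟨hi, hm⟩, hk⟩
    refine ⟨i, hi, by simpa using hm, ?_⟩
    rw [← hk, pvKeys, List.getD_eq_getElem _ _ (by simpa using hi)]
    simp
  · rintro ⟨i, hi, hm, hk⟩
    refine ⟨i, ⟨hi, by simpa using hm⟩, ?_⟩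
    rw [pvKeys, List.getD_eq_getElem _ _ (by simpa using hi)]
    simpa using hk

-- removing a matched index i (key k) from the unmatched pool decrements exactly the k-count
lemma pvCount_remove (expected) (matched : List Nat) (i : Nat) (hi : i < expected.length)
    (hnm : ¬ matched.contains i = true) (k' : Option String × Option String × Option String) :
    ((pvUnmatched expected (matched ++ [i])).count k' : Int)
      = ((pvUnmatched expected matched).count k' : Int)
        - (if k' = pvKeyE expected[i] then 1 else 0) := by
  have hfilter : (List.range expected.length).filter (fun j => ! (matched ++ [i]).contains j)
      = ((List.range expected.length).filter (fun j => ! matched.contains j)).filter (fun j => ! (j == i)) := by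
    rw [List.filter_filter]
    apply List.filter_congr
    intro j _
    simp only [List.contains_append, List.contains_cons, List.contains_nil, Bool.or_false,
      Bool.not_or, Bool.and_comm]
  set g : Nat → Option String × Option String × Option String :=
    fun j => (pvKeys expected).getD j (none, none, none) with hg
  set v := (List.range expected.length).filter (fun j => ! matched.contains j) with hv
  have hvi : i ∈ v := by
    simp only [hv, List.mem_filter, List.mem_range, Bool.not_eq_true']
    exact ⟨hi, by simpa using hnm⟩
  have hvnd : v.Nodup := List.Nodup.filter _ List.nodup_range
  have herase : v.filter (fun j => !(j == i)) = v.erase i := by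
    rw [List.Nodup.erase_eq_filter hvnd]
    rfl
  have hperm : v.Perm (i :: v.erase i) := List.perm_cons_erase hvi
  have hcount : (v.map g).count k' = ((i :: v.erase i).map g).count k' :=
    (hperm.map g).count_eq k'
  have hgi : g i = pvKeyE expected[i] := by
    show (pvKeys expected).getD i (none, none, none) = _
    rw [pvKeys, List.getD_eq_getElem _ _ (by simpa using hi)]
    simp
  have hun : pvUnmatched expected (matched ++ [i]) = (v.erase i).map g := by
    rw [pvUnmatched, hfilter, herase]
  have hun2 : pvUnmatched expected matched = v.map g := by
    rw [pvUnmatched]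
  rw [hun, hun2, hcount, List.map_cons, List.count_cons, hgi]
  by_cases hk : k' = pvKeyE expected[i]
  · simp [hk]
  · simp [hk]
    exact Ne.symm hk

lemma pvMap_getD_range {α : Type} (d : α) (ks : List α) :
    (List.range ks.length).map (fun i => ks.getD i d) = ks := by
  apply List.ext_getElem
  · simp
  · intro n h1 h2
    simp only [List.getElem_map, List.getElem_range]
    rw [List.getD_eq_getElem _ _ (by simpa using h2)]

lemma pvFoldl_map_keyE (l : List (List (String × String)))
    (d : PySem.Dict (Option String × Option String × Option String) Int) :
    l.foldl (fun d e => d.insert (pvKeyE e) (d.getD (pvKeyE e) 0 + 1)) d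
      = (l.map pvKeyE).foldl (fun d x => d.insert x (d.getD x 0 + 1)) d := by
  induction l generalizing d with
  | nil => rfl
  | cons e l ih => simp only [List.foldl_cons, List.map_cons, ih]

lemma pvLoop (expected) : ∀ (fs : List (List (String × String))) (matched : List Nat)
    (cnt : PySem.Dict (Option String × Option String × Option String) Int) (tpA tpB : Int),
    pvInv expected matched cnt tpA tpB →
    (let stA := fs.foldl (fun (st : PySem.Set Nat × Int) f =>
        match pvFindA (pvKeyF f) st.1 expected 0 with
        | some i => (PySem.Set.add st.1 i, st.2 + 1)
        | none => st) (matched, tpA)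
     let stB := fs.foldl (fun (st : Int × PySem.Dict (Option String × Option String × Option String) Int) f =>
        let c := st.2.getD (pvKeyF f) 0
        if c > 0 then (st.1 + 1, st.2.insert (pvKeyF f) (c - 1)) else st) (tpB, cnt)
     stA.2 = stB.1 ∧ (stA.1.length : Int) = stA.2) := by
  intro fs
  induction fs with
  | nil =>
    intro matched cnt tpA tpB hinv
    obtain ⟨h1, h2, -, -, -⟩ := hinv
    exact ⟨h1, h2.symm⟩
  | cons f fs ih =>
    intro matched cnt tpA tpB hinv
    obtain ⟨h1, h2, h3, h4, h5⟩ := hinv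
    simp only [List.foldl_cons]
    cases hfind : pvFindA (pvKeyF f) matched expected 0 with
    | some i =>
      obtain ⟨hnm, j, hj, hij, hkey⟩ := pvFindA_some _ _ _ _ _ hfind
      have hi : i < expected.length := by omega
      have hkeyi : pvKeyE expected[i] = pvKeyF f := by
        subst hij; simpa using hkey
      have hpos : 0 < (pvUnmatched expected matched).count (pvKeyF f) :=
        (pvCount_pos_iff expected matched (pvKeyF f)).mpr ⟨i, hi, hnm, hkeyi⟩
      have hcpos : cnt.getD (pvKeyF f) 0 > 0 := by
        rw [h5]; exact_mod_cast hpos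
      have hadd : PySem.Set.add matched i = matched ++ [i] := by
        simp only [PySem.Set.add]
        rw [if_neg hnm]
      simp only [hadd]
      rw [if_pos hcpos]
      apply ih
      refine ⟨by rw [h1], by rw [h2]; push_cast [List.length_append, List.length_singleton]; ring, ?_, ?_, ?_⟩
      · have hinotmem : i ∉ matched := fun hm => hnm (by simpa using hm)
        simp [List.nodup_append, h3]
        exact fun a ha he => hinotmem (he ▸ ha)
      · intro x hx
        rcases List.mem_append.mp hx with hx | hx
        · exact h4 x hx
        · simpa using (List.mem_singleton.mp hx) ▸ hi
      · intro k'
        rw [PySem.Dict.getD_insert, pvCount_remove expected matched i hi hnm k', hkeyi, ← h5 k']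
        split_ifs with hk
        · subst hk; ring
        · ring
    | none =>
      have hnone := (pvFindA_none_iff (pvKeyF f) matched expected 0).mp hfind
      have hzero : (pvUnmatched expected matched).count (pvKeyF f) = 0 := by
        by_contra hne
        obtain ⟨i, hiL, hinm, hik⟩ :=
          (pvCount_pos_iff expected matched (pvKeyF f)).mp (Nat.pos_of_ne_zero hne)
        exact (hnone i hiL (by simpa using hinm)) (by simpa using hik)
      have hngt : ¬ cnt.getD (pvKeyF f) 0 > 0 := by
        rw [h5, hzero]; simp
      rw [if_neg hngt]
      exact ih _ _ _ _ ⟨h1, h2, h3, h4, h5⟩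

-- ===== VERDICT (by name: the statement is the Claim_ definition above) =====
theorem match_violations_spec : Claim_equal_match_violations := by
  intro found expected _
  unfold Spec_match_violations
  show match_violations found expected = match_violations_alt found expected
  simp only [match_violations, match_violations_alt]
  rw [show (PySem.Set.empty : List Nat) = ([] : List Nat) from rfl]
  have hun0 : pvUnmatched expected [] = pvKeys expected := by
    have hlen : expected.length = (pvKeys expected).length := by simp [pvKeys]
    simp only [pvUnmatched, List.contains_nil, Bool.not_false, List.filter_true]
    rw [hlen, pvMap_getD_range]
  have hcnt0 : ∀ k, (expected.foldl (fun (d : PySem.Dict (Option String × Option String × Option String) Int) e =>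
      d.insert (pvKeyE e) (d.getD (pvKeyE e) 0 + 1)) PySem.Dict.empty).getD k 0
      = ((pvUnmatched expected []).count k : Int) := by
    intro k
    rw [pvFoldl_map_keyE, PySem.Dict.getD_foldl_insert_add_one, hun0]
    simp [pvKeys]
  have h := pvLoop expected found [] _ 0 0 ⟨rfl, rfl, List.nodup_nil, by simp, hcnt0⟩
  obtain ⟨e1, e2⟩ := h
  simp only [Prod.mk.injEq]
  exact ⟨e1, by rw [e1], by rw [e2, e1]⟩
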